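-- pv_equiv track=rewrite | github.com/KrittyKrat/Modbus-Testing | modules/test.py | getSignalStrength
-- ===== SOURCE A (Python) =====
-- def getSignalStrength(temp):
--     bits = bin(temp[1]).replace("0b", "")
--     bits = bits.replace('1', 'x')
--     bits = bits.replace('0', '1')
--     bits = bits.replace('x', '0')
--
--     newBits = ""
--     added = False
--     for i in reversed(range(0, len(bits))):
--         if added:
--             newBits = bits[i] + newBits
--         elif bits[i] == '0':
--             added = True
--             newBits = '1' + newBits
--         else:
--             newBits = '0' + newBits
--
--     return -int(newBits, 2)
-- ===== SOURCE B (Python) =====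
-- def getSignalStrength(temp):
--     n = temp[1]
--     if n > 0:
--         return n - (1 << n.bit_length())
--     if n == 0:
--         return 0
--     return (1 << (-n).bit_length()) - (-n)
-- ===== Notes on version B (the rewrite author's own statement) =====
-- stated objective: simpler
-- what changed: B replaces A's bin()-string construction, the three replace() calls and the right-to-left carry loop by one closed-form arithmetic expression per sign of temp[1] (n - 2^bit_length(n) for n > 0, 0 for n == 0, 2^bit_length(-n) - (-n) for n < 0).
import Mathlib
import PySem

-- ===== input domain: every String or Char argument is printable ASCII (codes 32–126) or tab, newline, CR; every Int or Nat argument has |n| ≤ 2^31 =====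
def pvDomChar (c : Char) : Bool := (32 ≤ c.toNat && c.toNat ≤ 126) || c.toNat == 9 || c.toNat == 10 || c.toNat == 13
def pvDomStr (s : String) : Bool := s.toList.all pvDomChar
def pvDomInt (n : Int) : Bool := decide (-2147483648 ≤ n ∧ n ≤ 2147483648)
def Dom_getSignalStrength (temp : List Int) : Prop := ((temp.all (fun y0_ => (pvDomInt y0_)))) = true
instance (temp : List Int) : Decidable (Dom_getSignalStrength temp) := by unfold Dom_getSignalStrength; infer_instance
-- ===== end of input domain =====

-- B replaces A's bin()/replace string building and carry loop by one closed-form arithmetic expression per sign of temp[1] (objective: simpler).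

-- ===== PORT A =====
-- one step of A's carry loop; the loop walks i over reversed(range(0, len(bits))) and reads bits[i]
def pvStepA (bits : List Char) (s : List Char × Bool) (i : Nat) : List Char × Bool :=
  if s.2 then (bits.getD i ' ' :: s.1, true)
  else if bits.getD i ' ' = '0' then ('1' :: s.1, true)
  else ('0' :: s.1, false)

-- int(cs, 2), ported by hand: exact on the strings this program feeds it (nonempty runs of '0'/'1' digits, optionally after a leading '-')
def pvBinVal (cs : List Char) : Nat := cs.foldl (fun a c => 2 * a + (if c = '1' then 1 else 0)) 0
def pvParseBin (cs : List Char) : Int :=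
  match cs with
  | '-' :: t => -(pvBinVal t : Int)
  | _ => (pvBinVal cs : Int)

-- body of A after n = temp[1]
def pvCoreA (n : Int) : Int :=
  let bits0 := PySem.Chars.replace (PySem.Int.toBinChars0b n) ['0', 'b'] []    -- bin(temp[1]).replace("0b", "")
  let bits1 := PySem.Chars.replace bits0 ['1'] ['x']
  let bits2 := PySem.Chars.replace bits1 ['0'] ['1']
  let bits  := PySem.Chars.replace bits2 ['x'] ['0']
  let r := List.foldl (pvStepA bits) ([], false) (List.range bits.length).reverse
  let out := -(pvParseBin r.1)
  out

def getSignalStrength (temp : List Int) : Int :=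
  pvCoreA ((PySem.List.pyGet? temp 1).getD 0)    -- temp[1]; Pre_ guarantees the index is in range

-- ===== PORT B =====
-- body of B after n = temp[1]
def pvCoreB (n : Int) : Int :=
  if n > 0 then n - (1 <<< PySem.Int.bitLength n)
  else if n = 0 then 0
  else (1 <<< PySem.Int.bitLength (-n)) - (-n)

def getSignalStrength_alt (temp : List Int) : Int :=
  pvCoreB ((PySem.List.pyGet? temp 1).getD 0)    -- temp[1]; Pre_ guarantees the index is in range

-- ===== PRECONDITION & SPEC =====
-- A (and B) raise IndexError on temp[1] when the list has fewer than two elements; nothing else raises.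
def Pre_getSignalStrength (temp : List Int) : Prop := 2 ≤ temp.length
instance (temp : List Int) : Decidable (Pre_getSignalStrength temp) := by unfold Pre_getSignalStrength; infer_instance
def pvWitness_getSignalStrength : List Int := [0, 5]

def Spec_getSignalStrength (temp : List Int) (out : Int) : Prop := out = getSignalStrength_alt temp
instance (temp : List Int) (out : Int) : Decidable (Spec_getSignalStrength temp out) := by unfold Spec_getSignalStrength; infer_instance

-- ===== CLAIM (what is proved, stated in full; the proofs are below) =====
def Claim_equal_getSignalStrength : Prop := ∀ (temp : List Int), Dom_getSignalStrength temp → Pre_getSignalStrength temp → Spec_getSignalStrength temp (getSignalStrength temp)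

-- ===== LEMMAS AND PROOFS =====

-- big-endian binary digit string of a natural number (reference model of Nat.toDigits 2)
def pvBin (n : Nat) : List Char :=
  if _h : n < 2 then [Nat.digitChar n]
  else pvBin (n / 2) ++ [Nat.digitChar (n % 2)]
decreasing_by exact Nat.div_lt_self (by omega) (by omega)

-- the net effect of the three single-character replaces on a 'x'-free string
def pvSw (c : Char) : Char := if c = '1' then '0' else if c = '0' then '1' else c

-- the carry loop as a foldr over the character list (right-to-left like the Python loop)
def pvStepC (c : Char) (s : List Char × Bool) : List Char × Bool :=
  if s.2 then (c :: s.1, true)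
  else if c = '0' then ('1' :: s.1, true)
  else ('0' :: s.1, false)

lemma pvToDigitsCore_eq (fuel n : Nat) (acc : List Char) (h : n < fuel) :
    Nat.toDigitsCore 2 fuel n acc = pvBin n ++ acc := by
  induction fuel generalizing n acc with
  | zero => omega
  | succ f ih =>
    rw [Nat.toDigitsCore]
    by_cases h2 : n / 2 = 0
    · have hn : n < 2 := by omega
      rw [pvBin]
      simp [h2, hn, Nat.mod_eq_of_lt hn]
    · have hn : ¬ n < 2 := by omega
      rw [pvBin]
      simp only [hn, dite_false]
      rw [if_neg h2, ih (n / 2) _ (by omega), List.append_assoc]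
      rfl

lemma pvToDigits_eq (n : Nat) : Nat.toDigits 2 n = pvBin n := by
  have := pvToDigitsCore_eq (n + 1) n [] (by omega)
  simpa [Nat.toDigits] using this

lemma pvBin_mem (n : Nat) : ∀ c ∈ pvBin n, c = '0' ∨ c = '1' := by
  induction n using pvBin.induct with
  | case1 n h =>
    rw [pvBin]
    simp only [h, dite_true]
    interval_cases n <;> simp [Nat.digitChar]
  | case2 n h ih =>
    rw [pvBin]
    simp only [h, dite_false]
    intro c hc
    rcases List.mem_append.1 hc with h1 | h1
    · exact ih c h1
    · have : n % 2 = 0 ∨ n % 2 = 1 := by omega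
      rcases this with h2 | h2 <;> simp [h2, Nat.digitChar] at h1 <;> simp [h1]

lemma pvBinVal_foldl (t : List Char) (a : Nat) :
    t.foldl (fun a c => 2 * a + (if c = '1' then 1 else 0)) a = a * 2 ^ t.length + pvBinVal t := by
  induction t generalizing a with
  | nil => simp [pvBinVal]
  | cons c t ih =>
    have h1 := ih (2 * a + (if c = '1' then 1 else 0))
    have h2 := ih (2 * 0 + (if c = '1' then 1 else 0))
    simp only [pvBinVal, List.foldl_cons] at *
    rw [h1, h2]
    simp [List.length_cons, pow_succ]
    split_ifs <;> ring

lemma pvBinVal_cons (c : Char) (t : List Char) :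
    pvBinVal (c :: t) = (if c = '1' then 1 else 0) * 2 ^ t.length + pvBinVal t := by
  have := pvBinVal_foldl t (2 * 0 + (if c = '1' then 1 else 0))
  simp only [pvBinVal, List.foldl_cons] at *
  rw [this]
  ring

lemma pvBinVal_append_one (s : List Char) (c : Char) :
    pvBinVal (s ++ [c]) = 2 * pvBinVal s + (if c = '1' then 1 else 0) := by
  simp [pvBinVal, List.foldl_append]

lemma pvBin_val (n : Nat) : pvBinVal (pvBin n) = n := by
  induction n using pvBin.induct with
  | case1 n h =>
    rw [pvBin]
    simp only [h, dite_true]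
    interval_cases n <;> decide
  | case2 n h ih =>
    rw [pvBin]
    simp only [h, dite_false]
    rw [pvBinVal_append_one, ih]
    have h2 : n % 2 = 0 ∨ n % 2 = 1 := by omega
    rcases h2 with h2 | h2 <;> simp [h2, Nat.digitChar] <;> omega

lemma pvBin_len (n : Nat) (h : 1 ≤ n) : (pvBin n).length = PySem.Int.bitLength (n : Int) := by
  induction n using pvBin.induct with
  | case1 n h2 =>
    rw [pvBin]
    simp only [h2, dite_true]
    interval_cases n
    all_goals decide
  | case2 n h2 ih =>
    rw [pvBin]
    simp only [h2, dite_false]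
    rw [PySem.Int.bitLength_natCast (by omega : 0 < n)]
    simp [ih (by omega)]

lemma pvBinVal_zero (s : List Char) (h : ∀ c ∈ s, c = '0') : pvBinVal s = 0 := by
  induction s with
  | nil => rfl
  | cons c t ih =>
    rw [pvBinVal_cons, ih (fun d hd => h d (List.mem_cons_of_mem c hd))]
    have := h c List.mem_cons_self
    simp [this]

lemma pvReplaceGo_single (a b : Char) (s : List Char) : ∀ (fuel : Nat) (acc : List Char), s.length ≤ fuel →
    PySem.Chars.replace.go [a] [b] fuel s acc = acc.reverse ++ s.map (fun c => if c = a then b else c) := by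
  induction s with
  | nil =>
    intro fuel acc _
    cases fuel <;> simp [PySem.Chars.replace.go]
  | cons c t ih =>
    intro fuel acc hf
    cases fuel with
    | zero => simp at hf
    | succ f =>
      rw [PySem.Chars.replace.go]
      by_cases hc : c = a
      · simp [List.isPrefixOf, hc, ih f (b :: acc) (by simpa using hf)]
      · have hba : (a == c) = false := by simp [Ne.symm hc]
        simp [List.isPrefixOf, hba, hc, ih f (c :: acc) (by simpa using hf)]

lemma pvReplace_single (a b : Char) (s : List Char) :
    PySem.Chars.replace s [a] [b] = s.map (fun c => if c = a then b else c) := by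
  rw [PySem.Chars.replace]
  simp [pvReplaceGo_single a b s s.length [] (le_refl _)]

lemma pvReplaceGo_0b (ds : List Char) (h : 'b' ∉ ds) : ∀ (fuel : Nat) (acc : List Char), ds.length ≤ fuel →
    PySem.Chars.replace.go ['0', 'b'] [] fuel ds acc = acc.reverse ++ ds := by
  induction ds with
  | nil =>
    intro fuel acc _
    cases fuel <;> simp [PySem.Chars.replace.go]
  | cons c t ih =>
    intro fuel acc hf
    cases fuel with
    | zero => simp at hf
    | succ f =>
      rw [PySem.Chars.replace.go]
      have hpre : List.isPrefixOf ['0', 'b'] (c :: t) = false := by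
        cases t with
        | nil => simp [List.isPrefixOf]
        | cons d t2 =>
          have hd : d ≠ 'b' := fun hd => h (by simp [hd])
          have : ('b' == d) = false := by simp [Ne.symm hd]
          simp [List.isPrefixOf, this]
      rw [if_neg (by simp [hpre])]
      rw [ih (fun ht => h (List.mem_cons_of_mem c ht)) f (c :: acc) (by simpa using hf)]
      simp

lemma pvReplace_0b (ds : List Char) (h : 'b' ∉ ds) :
    PySem.Chars.replace ('0' :: 'b' :: ds) ['0', 'b'] [] = ds := by
  rw [PySem.Chars.replace]
  simp only [List.isEmpty_cons, Bool.false_eq_true, if_false, List.length_cons]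
  rw [PySem.Chars.replace.go]
  rw [if_pos (by simp [List.isPrefixOf])]
  simpa using pvReplaceGo_0b ds h _ [] (by simp)

lemma pvReplace_0b_neg (ds : List Char) (h : 'b' ∉ ds) :
    PySem.Chars.replace ('-' :: '0' :: 'b' :: ds) ['0', 'b'] [] = '-' :: ds := by
  rw [PySem.Chars.replace]
  simp only [List.isEmpty_cons, Bool.false_eq_true, if_false, List.length_cons]
  rw [PySem.Chars.replace.go]
  rw [if_neg (by simp [List.isPrefixOf])]
  rw [PySem.Chars.replace.go]
  rw [if_pos (by simp [List.isPrefixOf])]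
  simpa using pvReplaceGo_0b ds h _ ['-'] (by simp)

lemma pvSwapChain (s : List Char) (h : ∀ c ∈ s, c ≠ 'x') :
    PySem.Chars.replace (PySem.Chars.replace (PySem.Chars.replace s ['1'] ['x']) ['0'] ['1']) ['x'] ['0'] = s.map pvSw := by
  rw [pvReplace_single, pvReplace_single, pvReplace_single, List.map_map, List.map_map]
  refine List.map_congr_left ?_
  intro c hc
  have hx := h c hc
  simp only [Function.comp_apply, pvSw]
  by_cases h1 : c = '1'
  · simp [h1]
  · by_cases h0 : c = '0'
    · simp [h0]
    · simp [h1, h0, hx]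

lemma pvLoop_eq (bits : List Char) (init : List Char × Bool) :
    List.foldl (pvStepA bits) init (List.range bits.length).reverse = List.foldr pvStepC init bits := by
  induction bits using List.reverseRecOn generalizing init with
  | nil => simp
  | append_singleton xs c ih =>
    have hlen : (xs ++ [c]).length = xs.length + 1 := by simp
    rw [hlen, List.range_succ, List.reverse_append, List.reverse_singleton, List.singleton_append,
      List.foldl_cons]
    have hstep : pvStepA (xs ++ [c]) init xs.length = pvStepC c init := by
      simp [pvStepA, pvStepC]
    rw [hstep]
    have hext : List.foldl (pvStepA (xs ++ [c])) (pvStepC c init) (List.range xs.length).reverse =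
        List.foldl (pvStepA xs) (pvStepC c init) (List.range xs.length).reverse := by
      apply List.foldl_ext
      intro a i hi
      have hilt : i < xs.length := by
        have := List.mem_reverse.1 hi
        simpa using List.mem_range.1 this
      have hgd2 : (xs ++ [c]).getD i ' ' = xs.getD i ' ' := by
        simp [List.getD, List.getElem?_append_left hilt]
      rw [pvStepA, pvStepA, hgd2]
    rw [hext, ih, List.foldr_append, List.foldr_cons, List.foldr_nil]

lemma pvSw_val (s : List Char) (hb : ∀ c ∈ s, c = '0' ∨ c = '1') :
    pvBinVal (s.map pvSw) + pvBinVal s + 1 = 2 ^ s.length := by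
  induction s with
  | nil => decide
  | cons c t ih =>
    have iht := ih (fun d hd => hb d (List.mem_cons_of_mem c hd))
    have hc := hb c List.mem_cons_self
    simp only [List.map_cons]
    rw [pvBinVal_cons, pvBinVal_cons, List.length_map, List.length_cons, pow_succ]
    rcases hc with hc | hc <;> subst hc <;> (simp [pvSw]; omega)

lemma pvLoop_inv (s : List Char) (hb : ∀ c ∈ s, c = '0' ∨ c = '1') :
    (List.foldr pvStepC ([], false) s).1.length = s.length ∧
    (∀ c ∈ (List.foldr pvStepC ([], false) s).1, c = '0' ∨ c = '1') ∧
    ((List.foldr pvStepC ([], false) s).2 = true → pvBinVal (List.foldr pvStepC ([], false) s).1 = pvBinVal s + 1) ∧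
    ((List.foldr pvStepC ([], false) s).2 = false → (∀ c ∈ (List.foldr pvStepC ([], false) s).1, c = '0') ∧ pvBinVal s = 2 ^ s.length - 1) ∧
    ('0' ∈ s → (List.foldr pvStepC ([], false) s).2 = true) := by
  induction s with
  | nil =>
    refine ⟨rfl, by simp, by simp [pvBinVal], ?_, by simp⟩
    intro _
    exact ⟨by simp, by simp [pvBinVal]⟩
  | cons c t ih =>
    obtain ⟨ih1, ih2, ih3, ih4, ih5⟩ := ih (fun d hd => hb d (List.mem_cons_of_mem c hd))
    have hc := hb c List.mem_cons_self
    simp only [List.foldr_cons] at *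
    set rt := List.foldr pvStepC ([], false) t with hrt
    cases hr : rt.2 with
    | true =>
      have hstep : pvStepC c rt = (c :: rt.1, true) := by simp [pvStepC, hr]
      rw [hstep]
      refine ⟨by simp [ih1], ?_, ?_, by simp, fun _ => rfl⟩
      · intro d hd
        rcases List.mem_cons.1 hd with h1 | h1
        · exact h1 ▸ hc
        · exact ih2 d h1
      · intro _
        rw [pvBinVal_cons, pvBinVal_cons, ih1, ih3 hr]
        ring
    | false =>
      obtain ⟨hz, hvt⟩ := ih4 hr
      have hone : 1 ≤ 2 ^ t.length := Nat.one_le_two_pow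
      by_cases hc0 : c = '0'
      · have hstep : pvStepC c rt = ('1' :: rt.1, true) := by simp [pvStepC, hr, hc0]
        rw [hstep]
        refine ⟨by simp [ih1], ?_, ?_, by simp, fun _ => rfl⟩
        · intro d hd
          rcases List.mem_cons.1 hd with h1 | h1
          · exact Or.inr h1
          · exact ih2 d h1
        · intro _
          rw [pvBinVal_cons, pvBinVal_cons, pvBinVal_zero rt.1 hz, ih1, hvt, hc0]
          simp; omega
      · have hc1 : c = '1' := hc.resolve_left hc0
        have hstep : pvStepC c rt = ('0' :: rt.1, false) := by simp [pvStepC, hr, hc0]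
        rw [hstep]
        refine ⟨by simp [ih1], ?_, by simp, ?_, ?_⟩
        · intro d hd
          rcases List.mem_cons.1 hd with h1 | h1
          · exact Or.inl h1
          · exact ih2 d h1
        · intro _
          refine ⟨?_, ?_⟩
          · intro d hd
            rcases List.mem_cons.1 hd with h1 | h1
            · exact h1
            · exact hz d h1
          · rw [pvBinVal_cons, hvt, hc1, List.length_cons, pow_succ]
            simp; omega
        · intro hmem
          rcases List.mem_cons.1 hmem with h1 | h1
          · exact absurd h1.symm (by simp [hc1])
          · rw [ih5 h1] at hr
            exact absurd hr (by simp)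

lemma pvParseBin_digits (cs : List Char) (h : ∀ c ∈ cs, c = '0' ∨ c = '1') :
    pvParseBin cs = (pvBinVal cs : Int) := by
  cases cs with
  | nil => rfl
  | cons c t =>
    have hc := h c List.mem_cons_self
    rcases hc with hc | hc <;> subst hc <;> rfl

lemma pvBin_no_b (m : Nat) : 'b' ∉ pvBin m := by
  intro hb
  rcases pvBin_mem m 'b' hb with h | h <;> simp at h

lemma pvMain (m : Nat) (hm : 1 ≤ m) :
    ∃ nb : List Char, List.foldr pvStepC ([], false) ((pvBin m).map pvSw) = (nb, true) ∧
      (∀ c ∈ nb, c = '0' ∨ c = '1') ∧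
      (pvBinVal nb : Int) = 2 ^ PySem.Int.bitLength (m : Int) - m := by
  have hbm := pvBin_mem m
  have hbits : ∀ c ∈ (pvBin m).map pvSw, c = '0' ∨ c = '1' := by
    intro c hc
    obtain ⟨d, hd, rfl⟩ := List.mem_map.1 hc
    rcases hbm d hd with h | h <;> subst h <;> simp [pvSw]
  obtain ⟨i1, i2, i3, i4, i5⟩ := pvLoop_inv _ hbits
  have hzero_mem : '0' ∈ (pvBin m).map pvSw := by
    have hnall : ¬ (∀ c ∈ pvBin m, c = '0') := by
      intro hall
      have := pvBinVal_zero _ hall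
      rw [pvBin_val] at this
      omega
    push_neg at hnall
    obtain ⟨d, hd, hdne⟩ := hnall
    have hd1 : d = '1' := (hbm d hd).resolve_left hdne
    exact List.mem_map.2 ⟨d, hd, by simp [hd1, pvSw]⟩
  have htrue := i5 hzero_mem
  refine ⟨(List.foldr pvStepC ([], false) ((pvBin m).map pvSw)).1, ?_, i2, ?_⟩
  · exact Prod.ext rfl htrue
  · have hv := i3 htrue
    have hsw := pvSw_val (pvBin m) hbm
    rw [pvBin_val] at hsw
    have hL : (pvBin m).length = PySem.Int.bitLength (m : Int) := pvBin_len m hm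
    have hnat : pvBinVal (List.foldr pvStepC ([], false) ((pvBin m).map pvSw)).1 + m
        = 2 ^ (pvBin m).length := by
      rw [hv]
      omega
    rw [hL] at hnat
    have hcast := congrArg (Nat.cast : Nat → Int) hnat
    push_cast at hcast
    linarith

lemma pvCore_eq (n : Int) : pvCoreA n = pvCoreB n := by
  rcases lt_trichotomy n 0 with hn | hn | hn
  · -- n < 0
    set m := n.natAbs with hmdef
    have hm : 1 ≤ m := by omega
    obtain ⟨nb, hnb, hnbd, hnbv⟩ := pvMain m hm
    have hb0b : PySem.Int.toBinChars0b n = '-' :: '0' :: 'b' :: pvBin m := by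
      rw [PySem.Int.toBinChars0b, if_pos hn, pvToDigits_eq]
    have hxfree : ∀ c ∈ '-' :: pvBin m, c ≠ 'x' := by
      intro c hc
      rcases List.mem_cons.1 hc with h | h
      · subst h; simp
      · rcases pvBin_mem m c h with h1 | h1 <;> subst h1 <;> simp
    simp only [pvCoreA]
    rw [hb0b, pvReplace_0b_neg _ (pvBin_no_b m), pvSwapChain _ hxfree]
    have hmap : ('-' :: pvBin m).map pvSw = '-' :: (pvBin m).map pvSw := by
      simp [pvSw]
    rw [hmap, pvLoop_eq, List.foldr_cons, hnb]
    have hstep : pvStepC '-' (nb, true) = ('-' :: nb, true) := rfl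
    rw [hstep]
    have hparse : pvParseBin ('-' :: nb) = -(pvBinVal nb : Int) := rfl
    simp only [hparse]
    have hnegn : -n = (m : Int) := by omega
    simp only [pvCoreB, if_neg (by omega : ¬ n > 0), if_neg (by omega : ¬ n = 0), hnegn]
    simp only [Nat.one_shiftLeft]
    push_cast
    linarith
  · -- n = 0
    subst hn
    decide
  · -- n > 0
    obtain ⟨m, rfl⟩ := Int.eq_ofNat_of_zero_le hn.le
    have hm : 1 ≤ m := by exact_mod_cast hn
    obtain ⟨nb, hnb, hnbd, hnbv⟩ := pvMain m hm
    have hb0b : PySem.Int.toBinChars0b (m : Int) = '0' :: 'b' :: pvBin m := by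
      rw [PySem.Int.toBinChars0b, if_neg (by omega : ¬ (m : Int) < 0), pvToDigits_eq]
      simp
    have hxfree : ∀ c ∈ pvBin m, c ≠ 'x' := by
      intro c hc
      rcases pvBin_mem m c hc with h1 | h1 <;> subst h1 <;> simp
    simp only [pvCoreA]
    rw [hb0b, pvReplace_0b _ (pvBin_no_b m), pvSwapChain _ hxfree, pvLoop_eq, hnb]
    have hparse : pvParseBin nb = (pvBinVal nb : Int) := pvParseBin_digits nb hnbd
    simp only [hparse]
    simp only [pvCoreB, if_pos (show (m : Int) > 0 by exact_mod_cast hm)]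
    simp only [Nat.one_shiftLeft]
    push_cast
    linarith

-- ===== VERDICT (by name: the statement is the Claim_ definition above) =====
theorem getSignalStrength_spec : Claim_equal_getSignalStrength := by
  intro temp _ _
  show _ = _
  unfold getSignalStrength getSignalStrength_alt
  exact pvCore_eq _
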